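-- pv_equiv track=rewrite | github.com/AlexisGR117/AYED | Programas/Juego de sumas 2.py | problema_sumas
-- ===== SOURCE A (Python) =====
-- def problema_sumas(s, n, index):
--     if n == 0:
--         return 1
--     elif n < 0:
--         return problema_sumas(s, n + int(s[index - 1]), index)
--     elif index + 1 > len(s):
--         return 0
--     return problema_sumas(s, n - int(s[index]), index + 1)
-- ===== SOURCE B (Python) =====
-- def problema_sumas(s, n, index):
--     # Single forward pass: within the precondition (positive integer entries,
--     # 0 <= index <= len(s)), A's add-back phase always restores n exactly,
--     # so each step either returns 1 (n == value), subtracts (n > value) or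
--     # leaves n unchanged (n < value).
--     if n == 0:
--         return 1
--     for i in range(index, len(s)):
--         v = int(s[i])
--         if n == v:
--             return 1
--         if n > v:
--             n -= v
--     return 0
-- ===== Notes on version B (the rewrite author's own statement) =====
-- stated objective: simpler
-- what changed: Replaces A's subtract/add-back tail recursion by a single forward for-loop, using the fact that under the precondition (positive integer entries, 0 <= index <= len(s)) an add-back phase restores n exactly, so each position either returns 1 (n equals the entry), subtracts (n greater) or skips (n smaller).
-- outside the precondition, e.g. on problema_sumas(['2'], -4, 1): A returns 1, B returns 0; on problema_sumas(['2'], 2, -1): A returns 1, B returns 1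
import Mathlib
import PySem

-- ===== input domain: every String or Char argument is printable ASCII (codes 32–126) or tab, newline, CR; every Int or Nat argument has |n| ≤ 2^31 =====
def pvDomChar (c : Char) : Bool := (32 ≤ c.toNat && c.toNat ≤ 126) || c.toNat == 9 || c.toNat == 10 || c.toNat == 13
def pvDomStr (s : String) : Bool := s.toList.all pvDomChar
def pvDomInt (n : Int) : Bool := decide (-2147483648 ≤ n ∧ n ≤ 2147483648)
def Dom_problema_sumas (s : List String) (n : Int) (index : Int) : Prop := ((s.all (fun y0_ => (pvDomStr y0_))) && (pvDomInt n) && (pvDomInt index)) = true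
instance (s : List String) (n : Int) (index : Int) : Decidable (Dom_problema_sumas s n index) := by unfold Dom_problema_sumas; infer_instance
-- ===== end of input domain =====

-- B replaces A's subtract/add-back tail recursion by one forward loop (each
-- add-back phase restores n exactly under the precondition); objective: simpler.

-- ===== PORT A =====
-- int(s[i]) for A's side; on Pre_ the index is in range and the string parses.
def pvIntA (s : List String) (i : Int) : Int :=
  ((PySem.List.pyGet? s i).bind PySem.Int.ofStr?).getD 0

-- A's general recursion is not structurally terminating (it diverges in Python
-- for nonpositive entries), so it is transcribed verbatim with a fuel counter;
-- fuel 2*len(s)+3 is proved sufficient on Pre_ (lemma problema_sumas_go_eq).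
def problema_sumas_go (s : List String) : Nat → Int → Int → Int
  | 0, _, _ => 0
  | fuel + 1, n, index =>
    if n = 0 then 1
    else if n < 0 then problema_sumas_go s fuel (n + pvIntA s (index - 1)) index
    else if (s.length : Int) < index + 1 then 0
    else problema_sumas_go s fuel (n - pvIntA s index) (index + 1)

def problema_sumas (s : List String) (n : Int) (index : Int) : Int :=
  problema_sumas_go s (2 * s.length + 3) n index

-- ===== PORT B =====
-- int(s[i]) for B's side.
def pvIntB (s : List String) (i : Int) : Int :=
  ((PySem.List.pyGet? s i).bind PySem.Int.ofStr?).getD 0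

-- B's `for i in range(index, len(s))` loop with its early return.
def problema_sumas_alt_go (s : List String) : List Int → Int → Int
  | [], _ => 0
  | i :: rest, n =>
    let v := pvIntB s i
    if n = v then 1
    else problema_sumas_alt_go s rest (if v < n then n - v else n)

def problema_sumas_alt (s : List String) (n : Int) (index : Int) : Int :=
  if n = 0 then 1
  else problema_sumas_alt_go s (PySem.List.pyRange index s.length 1) n

-- ===== PRECONDITION & SPEC =====
-- Pre_ excludes: inputs where int() raises ValueError or indexing raises
-- IndexError; negative starting n, where A's add-back recursion can diverge or
-- hit Python's recursion limit (RecursionError) and otherwise A's value depends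
-- on the add-back walk B does not perform; nonpositive parsed entries (infinite
-- recursion); and negative-index wraparound, an accident of Python list indexing.
def Pre_problema_sumas (s : List String) (n : Int) (index : Int) : Prop :=
  n = 0 ∨
  (0 < n ∧ (s.length : Int) < index + 1) ∨
  (0 < n ∧ 0 ≤ index ∧ index ≤ (s.length : Int) ∧
    ∀ e ∈ s, 0 < (PySem.Int.ofStr? e).getD 0)

instance (s : List String) (n : Int) (index : Int) : Decidable (Pre_problema_sumas s n index) := by
  unfold Pre_problema_sumas; infer_instance

def pvWitness_problema_sumas : List String × Int × Int := (["3", "5", "2"], 7, 0)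

def Spec_problema_sumas (s : List String) (n : Int) (index : Int) (out : Int) : Prop := out = problema_sumas_alt s n index
instance (s : List String) (n : Int) (index : Int) (out : Int) : Decidable (Spec_problema_sumas s n index out) := by unfold Spec_problema_sumas; infer_instance

-- ===== CLAIM (what is proved, stated in full; the proofs are below) =====
def Claim_equal_problema_sumas : Prop := ∀ (s : List String) (n : Int) (index : Int), Dom_problema_sumas s n index → Pre_problema_sumas s n index → Spec_problema_sumas s n index (problema_sumas s n index)

-- ===== LEMMAS AND PROOFS =====

-- On Pre_'s main region, each entry at an in-range index parses to a positive int.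
theorem pvIntA_pos (s : List String) (i : Nat) (hi : i < s.length)
    (Hpos : ∀ e ∈ s, 0 < (PySem.Int.ofStr? e).getD 0) :
    0 < pvIntA s (i : Int) ∧
      PySem.Int.ofStr? (s[i]'hi) = some (pvIntA s (i : Int)) := by
  have hget : PySem.List.pyGet? s (i : Int) = some (s[i]'hi) := by
    rw [PySem.List.pyGet?_natCast]; simp [hi]
  have hp := Hpos (s[i]'hi) (by exact List.getElem_mem hi)
  unfold pvIntA
  rw [hget]
  cases hofs : PySem.Int.ofStr? (s[i]'hi) with
  | none => rw [hofs] at hp; simp at hp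
  | some k =>
    simp [hofs] at hp ⊢
    exact hp

theorem pvIntB_eq_pvIntA (s : List String) (i : Int) : pvIntB s i = pvIntA s i := rfl

-- Fuel 2*(len(s)-i)+2 suffices, and A's walk from a positive n equals B's loop.
theorem problema_sumas_go_eq (s : List String)
    (Hpos : ∀ e ∈ s, 0 < (PySem.Int.ofStr? e).getD 0) :
    ∀ (fuel : Nat) (i : Nat) (n : Int), i ≤ s.length → 0 < n →
      2 * (s.length - i) + 2 ≤ fuel →
      problema_sumas_go s fuel n (i : Int) =
        problema_sumas_alt_go s (PySem.List.pyRange (i : Int) (s.length : Int) 1) n := by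
  intro fuel
  induction fuel using Nat.strong_induction_on with
  | _ fuel IH =>
    intro i n hi hn hf
    obtain ⟨f, rfl⟩ : ∃ f, fuel = f + 1 := ⟨fuel - 1, by omega⟩
    by_cases hiL : i < s.length
    · -- one entry to process
      have hv := pvIntA_pos s i hiL Hpos
      set v := pvIntA s (i : Int) with hvdef
      have hcons : PySem.List.pyRange (i : Int) (s.length : Int) 1 =
          (i : Int) :: PySem.List.pyRange ((i : Int) + 1) (s.length : Int) 1 :=
        PySem.List.pyRange_one_cons (by exact_mod_cast hiL)
      rw [hcons]
      simp only [problema_sumas_go, problema_sumas_alt_go, pvIntB_eq_pvIntA, ← hvdef]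
      have hn0 : ¬ n = 0 := by omega
      have hnneg : ¬ n < 0 := by omega
      have hidx : ¬ ((s.length : Int) < (i : Int) + 1) := by exact_mod_cast by omega
      rw [if_neg hn0, if_neg hnneg, if_neg hidx]
      by_cases heq : n = v
      · -- n == v: A recurses once with n = 0 and returns 1; B returns 1
        subst heq
        obtain ⟨g, rfl⟩ : ∃ g, f = g + 1 := ⟨f - 1, by omega⟩
        simp [problema_sumas_go]
      · rw [if_neg heq]
        by_cases hlt : v < n
        · -- n > v: plain subtraction step on both sides
          rw [if_pos hlt]
          have : ((i : Int) + 1) = ((i + 1 : Nat) : Int) := by push_cast; ring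
          rw [this]
          exact IH f (by omega) (i + 1) (n - v) (by omega) (by omega) (by omega)
        · -- n < v: A goes negative once and adds the same entry back
          rw [if_neg hlt]
          have hvpos := hv.1
          have hneg : n - v < 0 := by omega
          obtain ⟨g, rfl⟩ : ∃ g, f = g + 1 := ⟨f - 1, by omega⟩
          have hstep : problema_sumas_go s (g + 1) (n - v) ((i : Int) + 1) =
              problema_sumas_go s g n ((i : Int) + 1) := by
            simp only [problema_sumas_go]
            rw [if_neg (by omega : ¬ n - v = 0), if_pos hneg]
            have : (i : Int) + 1 - 1 = (i : Int) := by ring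
            rw [this, ← hvdef]
            congr 1
            omega
          rw [hstep]
          have : ((i : Int) + 1) = ((i + 1 : Nat) : Int) := by push_cast; ring
          rw [this]
          exact IH g (by omega) (i + 1) n (by omega) hn (by omega)
    · -- i = len(s): both sides return 0
      have hiL' : i = s.length := by omega
      subst hiL'
      have hempty : PySem.List.pyRange (s.length : Int) (s.length : Int) 1 = [] := by
        rw [PySem.List.pyRange_one]; simp
      rw [hempty]
      simp only [problema_sumas_go, problema_sumas_alt_go]
      rw [if_neg (by omega : ¬ n = 0), if_neg (by omega : ¬ n < 0),
        if_pos (by exact_mod_cast by omega : (s.length : Int) < (s.length : Int) + 1)]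

-- ===== VERDICT (by name: the statement is the Claim_ definition above) =====
theorem problema_sumas_spec : Claim_equal_problema_sumas := by
  intro s n index _hdom hpre
  unfold Spec_problema_sumas problema_sumas problema_sumas_alt
  rcases hpre with h0 | ⟨hn, hout⟩ | ⟨hn, hi0, hiL, Hpos⟩
  · subst h0
    simp [problema_sumas_go]
  · -- index+1 > len(s) and n > 0: A returns 0 at once, B's range is empty
    rw [if_neg (by omega : ¬ n = 0)]
    have hL0 : (s.length : Int) ≤ index := by omega
    have hempty : PySem.List.pyRange index (s.length : Int) 1 = [] := by
      rw [PySem.List.pyRange_one]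
      have : ((s.length : Int) - index).toNat = 0 := by omega
      simp [this]
    rw [hempty]
    simp only [problema_sumas_go, problema_sumas_alt_go]
    rw [if_neg (by omega : ¬ n = 0), if_neg (by omega : ¬ n < 0), if_pos (by omega)]
  · rw [if_neg (by omega : ¬ n = 0)]
    obtain ⟨i, rfl⟩ : ∃ i : Nat, index = (i : Int) := ⟨index.toNat, by omega⟩
    exact problema_sumas_go_eq s Hpos (2 * s.length + 3) i n (by exact_mod_cast hiL) hn (by omega)
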